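-- pv_equiv track=rewrite | github.com/FLi79Za/PromptHub | app.py | parse_prompt_txt
-- ===== SOURCE A (Python) =====
-- def parse_prompt_txt(raw_text: str) -> dict:
--     meta = {}
--     lines = raw_text.splitlines()
--     content_start = 0
--     for i, line in enumerate(lines):
--         stripped = line.strip()
--         if stripped == "---":
--             content_start = i + 1
--             break
--         if stripped.startswith("#") and ":" in stripped:
--             try:
--                 key, val = stripped[1:].split(":", 1)
--                 meta[key.strip().lower()] = val.strip()
--                 content_start = i + 1
--             except ValueError:
--                 pass
--         else:
--             break
--     return {
--         "title": meta.get("title", ""),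
--         "category": meta.get("category", ""),
--         "tool": meta.get("tool", ""),
--         "prompt_type": meta.get("type", ""),
--         "notes": meta.get("notes", ""),
--         "content": "\n".join(lines[content_start:]).strip(),
--     }
-- ===== SOURCE B (Python) =====
-- def parse_prompt_txt(raw_text: str) -> dict:
--     lines = raw_text.splitlines()
--     # pass 1: find the header/content boundary only
--     boundary, ends_with_dash = len(lines), False
--     for i, line in enumerate(lines):
--         s = line.strip()
--         if s == "---":
--             boundary, ends_with_dash = i + 1, True
--             break
--         if not (s.startswith("#") and ":" in s):
--             boundary = i
--             break
--     header = lines[:boundary - 1] if ends_with_dash else lines[:boundary]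
--     # pass 2: populate meta from the header lines only
--     meta = {}
--     for line in header:
--         s = line.strip()
--         key, _, val = s[1:].partition(":")
--         meta[key.strip().lower()] = val.strip()
--     content = "\n".join(lines[boundary:]).strip()
--     return {
--         "title": meta.get("title", ""),
--         "category": meta.get("category", ""),
--         "tool": meta.get("tool", ""),
--         "prompt_type": meta.get("type", ""),
--         "notes": meta.get("notes", ""),
--         "content": content,
--     }
-- ===== Notes on version B (the rewrite author's own statement) =====
-- stated objective: alternative
-- what changed: A interleaves metadata parsing with its header scan in one loop with break; B first scans only for the header/content boundary, then populates meta by folding over just the header lines (using str.partition instead of split-and-unpack) and joins the remaining lines as content.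
import Mathlib
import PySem

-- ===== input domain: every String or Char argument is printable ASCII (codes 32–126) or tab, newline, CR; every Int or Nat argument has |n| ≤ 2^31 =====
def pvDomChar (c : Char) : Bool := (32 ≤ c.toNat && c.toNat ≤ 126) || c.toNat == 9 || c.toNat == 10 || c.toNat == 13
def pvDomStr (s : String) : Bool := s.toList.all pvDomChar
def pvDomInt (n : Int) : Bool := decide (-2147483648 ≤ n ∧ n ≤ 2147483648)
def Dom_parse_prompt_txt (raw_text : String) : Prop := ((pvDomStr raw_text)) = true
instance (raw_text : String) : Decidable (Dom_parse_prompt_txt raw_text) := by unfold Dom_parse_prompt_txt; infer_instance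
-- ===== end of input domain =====

-- B re-implements A's single header loop as two separate passes (boundary scan, then a fold
-- over only the header lines); same return value, objective: alternative decomposition.

-- ===== PORT A =====
-- A's for-loop with break, carrying (i, md, content_start); content_start is always a
-- nonnegative line count, so lines[content_start:] is ported as List.drop (exact here).
def pvALoop (lines : List String) (i : Nat) (md : PySem.Dict String String)
    (cs : Nat) : PySem.Dict String String × Nat :=
  match lines with
  | [] => (md, cs)
  | line :: rest =>
    let stripped := PySem.Str.strip line
    if stripped == "---" then (md, i + 1)
    else if PySem.Str.startswith stripped "#" && PySem.Str.isIn ":" stripped then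
      -- key, val = stripped[1:].split(":", 1); except ValueError: pass
      match PySem.Str.splitMax? (PySem.Str.slice stripped (some 1) none) ":" 1 with
      | some [key, val] =>
          pvALoop rest (i + 1)
            (md.insert (PySem.Str.lower (PySem.Str.strip key)) (PySem.Str.strip val)) (i + 1)
      | _ => pvALoop rest (i + 1) md cs
    else (md, cs)

def parse_prompt_txt (raw_text : String) : List (String × String) :=
  let lines := PySem.Str.splitlines raw_text
  let r := pvALoop lines 0 PySem.Dict.empty 0
  let md := r.1
  [("title", md.getD "title" ""), ("category", md.getD "category" ""),
   ("tool", md.getD "tool" ""), ("prompt_type", md.getD "type" ""),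
   ("notes", md.getD "notes" ""),
   ("content", PySem.Str.strip (PySem.Str.join "\n" (lines.drop r.2)))]

-- ===== PORT B =====
-- pass 1: boundary scan (returns the absolute boundary index and whether it ended on '---')
def pvBBoundary (lines : List String) (i : Nat) : Nat × Bool :=
  match lines with
  | [] => (i, false)
  | line :: rest =>
    let s := PySem.Str.strip line
    if s == "---" then (i + 1, true)
    else if !(PySem.Str.startswith s "#" && PySem.Str.isIn ":" s) then (i, false)
    else pvBBoundary rest (i + 1)

-- hand port of str.partition(sep) (content of the (before, sep, after) triple; exact for sep ≠ "")
def pvPartition (s : String) (sep : String) : String × String :=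
  match PySem.Str.splitMax? s sep 1 with
  | some [a, b] => (a, b)
  | _ => (s, "")

-- the per-line update of pass 2: md[key.strip().lower()] = val.strip()
def pvStep (d : PySem.Dict String String) (line : String) : PySem.Dict String String :=
  let s := PySem.Str.strip line
  let kv := pvPartition (PySem.Str.slice s (some 1) none) ":"
  d.insert (PySem.Str.lower (PySem.Str.strip kv.1)) (PySem.Str.strip kv.2)

-- pass 2: fold over the header lines only
def pvBMeta (header : List String) : PySem.Dict String String :=
  header.foldl pvStep PySem.Dict.empty

def parse_prompt_txt_alt (raw_text : String) : List (String × String) :=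
  let lines := PySem.Str.splitlines raw_text
  let bd := pvBBoundary lines 0
  let header := if bd.2 then lines.take (bd.1 - 1) else lines.take bd.1
  let md := pvBMeta header
  let content := PySem.Str.strip (PySem.Str.join "\n" (lines.drop bd.1))
  [("title", md.getD "title" ""), ("category", md.getD "category" ""),
   ("tool", md.getD "tool" ""), ("prompt_type", md.getD "type" ""),
   ("notes", md.getD "notes" ""), ("content", content)]

-- ===== PRECONDITION & SPEC =====
def Spec_parse_prompt_txt (raw_text : String) (out : List (String × String)) : Prop := out = parse_prompt_txt_alt raw_text
instance (raw_text : String) (out : List (String × String)) : Decidable (Spec_parse_prompt_txt raw_text out) := by unfold Spec_parse_prompt_txt; infer_instance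

-- ===== CLAIM (what is proved, stated in full; the proofs are below) =====
def Claim_equal_parse_prompt_txt : Prop := ∀ (raw_text : String), Dom_parse_prompt_txt raw_text → Spec_parse_prompt_txt raw_text (parse_prompt_txt raw_text)

-- ===== LEMMAS AND PROOFS =====

-- splitOnMax.go with maxsplit exhausted returns the remainder as the single last piece
theorem pvGoZero (c : Char) (fuel : Nat) (l cur : List Char) (acc : List (List Char)) :
    PySem.Chars.splitOnMax.go [c] fuel 0 l cur acc = acc.reverse ++ [cur.reverse ++ l] := by
  cases fuel with
  | zero => simp [PySem.Chars.splitOnMax.go]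
  | succ f => cases l <;> simp [PySem.Chars.splitOnMax.go]

-- with maxsplit = 1 and the separator present, go yields exactly two pieces
theorem pvGoShape (c : Char) (l : List Char) : ∀ (fuel : Nat) (cur : List Char)
    (acc : List (List Char)), l.length < fuel → c ∈ l →
    ∃ a b, PySem.Chars.splitOnMax.go [c] fuel 1 l cur acc = acc.reverse ++ [a, b] := by
  induction l with
  | nil => intro _ _ _ _ h; simp at h
  | cons x t ih =>
    intro fuel cur acc hf hm
    cases fuel with
    | zero => omega
    | succ f =>
      by_cases hx : x = c
      · subst hx
        refine ⟨cur.reverse, List.drop 1 (x :: t), ?_⟩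
        simp [PySem.Chars.splitOnMax.go, List.isPrefixOf, pvGoZero]
      · have hmt : c ∈ t := by
          rcases List.mem_cons.mp hm with h | h
          · exact absurd h.symm hx
          · exact h
        have hft : t.length < f := by simpa using Nat.lt_of_succ_lt_succ hf
        obtain ⟨a, b, hab⟩ := ih f (x :: cur) acc hft hmt
        refine ⟨a, b, ?_⟩
        simpa [PySem.Chars.splitOnMax.go, List.isPrefixOf, hx, Ne.symm hx] using hab

-- split(":", 1) on a string containing ':' yields exactly two strings
theorem pvSplitShape (s : String) (h : ':' ∈ s.toList) :
    ∃ a b, PySem.Str.splitMax? s ":" 1 = some [a, b] := by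
  obtain ⟨a, b, hab⟩ := pvGoShape ':' s.toList (s.toList.length + 1) [] []
    (Nat.lt_succ_self _) h
  refine ⟨String.ofList a, String.ofList b, ?_⟩
  have hc : PySem.Chars.splitMax? s.toList [':'] 1 = some [a, b] := by
    simp only [PySem.Chars.splitMax?, PySem.Chars.splitOnMax]
    norm_num
    simpa using hab
  have hsep : (":" : String).toList = [':'] := rfl
  rw [PySem.Str.splitMax?, hsep, hc]
  rfl

-- if a stripped line starts with '#' and contains ':', then stripped[1:] contains ':'
theorem pvColonTail (s : String) (h1 : PySem.Str.startswith s "#" = true)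
    (h2 : PySem.Str.isIn ":" s = true) :
    ':' ∈ (PySem.Str.slice s (some 1) none).toList := by
  have hpre : ['#'] <+: s.toList := by
    have := (PySem.Chars.startswith_iff s.toList "#".toList).mp (by simpa using h1)
    simpa using this
  have hmem : ':' ∈ s.toList := by
    have hinf : [':'] <:+: s.toList := by
      have := (PySem.Chars.isIn_iff_infix ":".toList s.toList).mp (by simpa using h2)
      simpa using this
    exact hinf.subset (by simp)
  obtain ⟨t, ht⟩ := hpre
  have hst : s.toList = '#' :: t := by simpa using ht.symm
  have hslice : (PySem.Str.slice s (some 1) none).toList = t := by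
    simp only [PySem.Str.toList_slice, PySem.Chars.slice_eq_listSlice]
    have h1n : PySem.List.slice s.toList (some ((1 : Nat) : Int)) none = s.toList.drop 1 :=
      PySem.List.slice_from_natCast _ _
    simp only [Nat.cast_one] at h1n
    rw [h1n, hst]
    rfl
  rw [hslice]
  have hm2 : ':' ∈ '#' :: t := hst ▸ hmem
  rcases List.mem_cons.mp hm2 with h | h
  · exact absurd h (by decide)
  · exact h

-- boundary indices only move forward
theorem pvBoundaryGe (lines : List String) : ∀ (i : Nat),
    i ≤ (pvBBoundary lines i).1 ∧
    ((pvBBoundary lines i).2 = true → i + 1 ≤ (pvBBoundary lines i).1) := by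
  induction lines with
  | nil => intro i; simp [pvBBoundary]
  | cons line rest ih =>
    intro i
    simp only [pvBBoundary]
    split_ifs with h1 h2
    · simp
    · simp
    · obtain ⟨ha, hb⟩ := ih (i + 1)
      exact ⟨by omega, fun hd => by have := hb hd; omega⟩

-- main loop correspondence: A's single pass = B's boundary pass + header fold
theorem pvLoopEq (lines : List String) : ∀ (i : Nat) (md : PySem.Dict String String),
    pvALoop lines i md i =
      (((if (pvBBoundary lines i).2 then lines.take ((pvBBoundary lines i).1 - i - 1)
          else lines.take ((pvBBoundary lines i).1 - i)).foldl pvStep md),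
        (pvBBoundary lines i).1) := by
  induction lines with
  | nil => intro i md; simp [pvALoop, pvBBoundary]
  | cons line rest ih =>
    intro i md
    by_cases h1 : (PySem.Str.strip line == "---") = true
    · simp [pvALoop, pvBBoundary, h1]
    · by_cases h2 : (PySem.Str.startswith (PySem.Str.strip line) "#"
          && PySem.Str.isIn ":" (PySem.Str.strip line)) = true
      · have h2' := h2
        simp only [Bool.and_eq_true] at h2'
        have hcolon := pvColonTail _ h2'.1 h2'.2
        obtain ⟨a, b, hab⟩ := pvSplitShape _ hcolon
        have hpart : pvPartition (PySem.Str.slice (PySem.Str.strip line) (some 1) none) ":"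
            = (a, b) := by
          simp [pvPartition, hab]
        have hA : pvALoop (line :: rest) i md i
            = pvALoop rest (i + 1)
                (md.insert (PySem.Str.lower (PySem.Str.strip a)) (PySem.Str.strip b)) (i + 1) := by
          simp only [pvALoop, h1, h2, hab]
          simp
        have hB : pvBBoundary (line :: rest) i = pvBBoundary rest (i + 1) := by
          simp only [pvBBoundary]
          rw [if_neg h1, if_neg (by intro hcon; rw [h2] at hcon; simp at hcon)]
        have hstep : pvStep md line
            = md.insert (PySem.Str.lower (PySem.Str.strip a)) (PySem.Str.strip b) := by
          simp [pvStep, hpart]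
        rw [hA, hB, ih (i + 1)]
        obtain ⟨hge1, hge2⟩ := pvBoundaryGe rest (i + 1)
        rcases hd : (pvBBoundary rest (i + 1)).2 with _ | _
        · simp only [Bool.false_eq_true, if_false]
          rw [show (pvBBoundary rest (i + 1)).1 - i
              = ((pvBBoundary rest (i + 1)).1 - (i + 1)) + 1 from by omega,
            List.take_succ_cons, List.foldl_cons, hstep]
        · have hge2' := hge2 hd
          simp only [if_true]
          rw [show (pvBBoundary rest (i + 1)).1 - i - 1
              = ((pvBBoundary rest (i + 1)).1 - (i + 1) - 1) + 1 from by omega,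
            List.take_succ_cons, List.foldl_cons, hstep]
      · have h2f : (PySem.Str.startswith (PySem.Str.strip line) "#"
            && PySem.Str.isIn ":" (PySem.Str.strip line)) = false :=
          Bool.eq_false_iff.mpr h2
        simp only [pvALoop, pvBBoundary]
        rw [if_neg h1, if_neg h2, if_neg h1]
        have himp : PySem.Chars.startswith (PySem.Chars.strip line.toList) ['#'] = true
            → PySem.Chars.isIn [':'] (PySem.Chars.strip line.toList) = false := by
          simpa using h2f
        have hc : PySem.Chars.startswith (PySem.Chars.strip line.toList) ['#'] = false
            ∨ PySem.Chars.isIn [':'] (PySem.Chars.strip line.toList) = false := by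
          by_cases hsw : PySem.Chars.startswith (PySem.Chars.strip line.toList) ['#'] = true
          · exact Or.inr (himp hsw)
          · exact Or.inl (Bool.eq_false_iff.mpr hsw)
        simp [hc]

-- ===== VERDICT (by name: the statement is the Claim_ definition above) =====
theorem parse_prompt_txt_spec : Claim_equal_parse_prompt_txt := by
  intro raw_text _
  unfold Spec_parse_prompt_txt parse_prompt_txt parse_prompt_txt_alt pvBMeta
  have h := pvLoopEq (PySem.Str.splitlines raw_text) 0 PySem.Dict.empty
  simp only [Nat.sub_zero] at h
  simp only [h]
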